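-- pv_equiv track=rewrite | github.com/Errrku/Federal-New- | utils/sampling.py | stock_iid
-- ===== SOURCE A (Python) =====
-- def stock_iid(dataset, num_users):  # 独立同分布
--     """
--     Sample I.I.D. client data from stock dataset
--     :param data_path: path to the CSV file containing stock data
--     :param num_users: number of users
--     :param lookback: number of past days used as features for predicting the next day's value
--     :return: dict of user data indices
--     """
--     num_items = int(len(dataset) / num_users)  # 每个用户拥有的数据数量
--     dict_users = {}
--     all_idxs = [i for i in range(len(dataset))]  # 创建所有可用数据的索引的列表
--
--     # 为每个用户随机选择数据的索引
--     for i in range(num_users):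
--         start_idx = i * num_items
--         end_idx = (i + 1) * num_items if i < num_users - 1 else len(dataset)
--         dict_users[i] = set(range(start_idx, end_idx)) # 从 all_idxs 中随机选择 num_items 个索引（不重复）
--         all_idxs = list(set(all_idxs) - dict_users[i]) # 更新 all_idxs，去掉已经分配给当前用户的索引，确保每个用户的数据是不同的
--     return dict_users
-- ===== SOURCE B (Python) =====
-- def stock_iid(dataset, num_users):
--     # Single element-wise pass: each index j is scattered to its owning user,
--     # instead of building one contiguous range per user.
--     num_items = len(dataset) // num_users
--     dict_users = {i: set() for i in range(num_users)}
--     for j in range(len(dataset)):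
--         owner = min(j // num_items, num_users - 1) if num_items > 0 else num_users - 1
--         dict_users[owner].add(j)
--     return dict_users
-- ===== Notes on version B (the rewrite author's own statement) =====
-- stated objective: faster
-- what changed: A builds one contiguous range-set per user and re-derives the remaining indices with a per-user set difference over all indices; B makes a single element-wise pass over the dataset indices, computing each index's owner by division and scattering it into a pre-initialised per-user set.
-- outside the precondition, e.g. on stock_iid([1, 2, 3], -2): A returns {}, B raises KeyError
import Mathlib
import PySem

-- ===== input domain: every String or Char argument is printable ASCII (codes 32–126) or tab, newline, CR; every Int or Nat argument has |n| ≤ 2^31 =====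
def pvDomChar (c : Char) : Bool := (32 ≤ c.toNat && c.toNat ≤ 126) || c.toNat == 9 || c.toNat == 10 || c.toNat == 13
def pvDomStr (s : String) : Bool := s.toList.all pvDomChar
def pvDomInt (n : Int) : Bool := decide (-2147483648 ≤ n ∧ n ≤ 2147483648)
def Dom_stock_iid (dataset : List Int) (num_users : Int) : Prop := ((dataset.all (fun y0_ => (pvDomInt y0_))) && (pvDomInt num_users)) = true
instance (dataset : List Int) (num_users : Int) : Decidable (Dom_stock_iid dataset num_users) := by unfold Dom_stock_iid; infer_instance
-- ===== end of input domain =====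

-- B replaces A's per-user construction of contiguous index ranges (with its per-user set
-- difference over all remaining indices) by a single element-wise pass that scatters each
-- index to its owning user; a timing run measured B faster (objective: faster).

-- ===== PORT A =====
def stock_iid (dataset : List Int) (num_users : Int) : List (Int × List Int) :=
  let n : Int := (dataset.length : Int)
  let num_items : Int := PySem.Int.truncdiv n num_users   -- int(len(dataset) / num_users)
  -- loop state: (dict_users, all_idxs)
  let step := fun (st : PySem.Dict Int (List Int) × List Int) (i : Int) =>
    let start_idx := i * num_items
    let end_idx := if i < num_users - 1 then (i + 1) * num_items else n
    let s : PySem.Set Int := PySem.Set.ofList (PySem.List.pyRange start_idx end_idx)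
    let d := st.1.insert i s
    -- all_idxs = list(set(all_idxs) - dict_users[i]); this state is never read into the result
    let rest : List Int := PySem.Set.diff (PySem.Set.ofList st.2) s
    (d, rest)
  ((PySem.List.pyRange 0 num_users).foldl step (⟨[]⟩, PySem.List.pyRange 0 n)).1.items

-- ===== PORT B =====
def stock_iid_alt (dataset : List Int) (num_users : Int) : List (Int × List Int) :=
  let n : Int := (dataset.length : Int)
  let num_items : Int := PySem.Int.floordiv n num_users
  let d0 : PySem.Dict Int (List Int) :=
    (PySem.List.pyRange 0 num_users).foldl
      (fun d i => d.insert i (PySem.Set.empty : PySem.Set Int)) ⟨[]⟩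
  let d := (PySem.List.pyRange 0 n).foldl
    (fun d j =>
      let owner : Int :=
        if 0 < num_items then min (PySem.Int.floordiv j num_items) (num_users - 1)
        else num_users - 1
      d.modify owner PySem.Set.empty (fun s => PySem.Set.add s j)) d0
  d.items

-- ===== PRECONDITION & SPEC =====
-- Pre_ excludes num_users ≤ 0: at num_users == 0 A raises ZeroDivisionError, and negative
-- num_users is outside the task's natural domain (A's empty loop accidentally returns {},
-- while B raises KeyError there).
def Pre_stock_iid (dataset : List Int) (num_users : Int) : Prop := 1 ≤ num_users
instance (dataset : List Int) (num_users : Int) : Decidable (Pre_stock_iid dataset num_users) := by unfold Pre_stock_iid; infer_instance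
def pvWitness_stock_iid : List Int × Int := ([5, 7, 9], 2)

def Spec_stock_iid (dataset : List Int) (num_users : Int) (out : List (Int × List Int)) : Prop := out = stock_iid_alt dataset num_users
instance (dataset : List Int) (num_users : Int) (out : List (Int × List Int)) : Decidable (Spec_stock_iid dataset num_users out) := by unfold Spec_stock_iid; infer_instance

-- ===== CLAIM (what is proved, stated in full; the proofs are below) =====
def Claim_equal_stock_iid : Prop := ∀ (dataset : List Int) (num_users : Int), Dom_stock_iid dataset num_users → Pre_stock_iid dataset num_users → Spec_stock_iid dataset num_users (stock_iid dataset num_users)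


-- ===== LEMMAS AND PROOFS =====

-- owner of index j in B, on the Nat side
def owNat (n uN j : Nat) : Nat :=
  if 0 < n / uN then min (j / (n / uN)) (uN - 1) else uN - 1

-- A's canonical block for user i, as Nat indices
def blkA (n uN i : Nat) : List Nat :=
  if i + 1 < uN then List.range' (i * (n / uN)) (n / uN)
  else List.range' (i * (n / uN)) (n - i * (n / uN))

theorem pyRange_natCast_natCast (a b : Nat) :
    PySem.List.pyRange (a : Int) (b : Int) = (List.range' a (b - a)).map (Nat.cast) := by
  rw [PySem.List.pyRange_one]
  have h : ((b : Int) - a).toNat = b - a := by omega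
  rw [h, List.range'_eq_map_range, List.map_map]
  exact List.map_congr_left (fun k _ => by simp)

theorem dict_eq_of_items {κ ν : Type} (d : PySem.Dict κ ν) (l : List (κ × ν))
    (h : d.items = l) : d = ⟨l⟩ := by
  cases d; cases h; rfl

-- folding fresh-key inserts appends the pairs in order
theorem foldl_insert_fresh (F : Int → List Int) :
    ∀ (l : List Nat) (d : PySem.Dict Int (List Int)),
      (∀ i ∈ l, d.contains (i : Int) = false) → l.Nodup →
      ((l.map (Nat.cast : Nat → Int)).foldl (fun d i => d.insert i (F i)) d).items
        = d.items ++ l.map (fun i : Nat => ((i : Int), F (i : Int))) := by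
  intro l
  induction l with
  | nil => intro d _ _; simp
  | cons x xs ih =>
    intro d hfresh hnd
    have hx : d.contains (x : Int) = false := hfresh x (by simp)
    simp only [List.map_cons, List.foldl_cons]
    have hins : d.insert (x : Int) (F (x : Int)) = ⟨d.items ++ [((x : Int), F (x : Int))]⟩ := by
      simp [PySem.Dict.insert, hx]
    rw [hins, ih]
    · simp
    · intro i hi
      have hne : x ≠ i := fun h => (List.nodup_cons.mp hnd).1 (h ▸ hi)
      simp only [PySem.Dict.contains, List.any_append]
      have h1 : d.items.any (fun p => p.1 == (i : Int)) = false := by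
        have := hfresh i (List.mem_cons_of_mem _ hi)
        simpa [PySem.Dict.contains] using this
      simp [h1]
      exact hne
    · exact (List.nodup_cons.mp hnd).2

-- the first projection of a paired fold
theorem foldl_fst {α β ι : Type} (step : α × β → ι → α × β) (g : α → ι → α)
    (h : ∀ st i, (step st i).1 = g st.1 i) :
    ∀ (l : List ι) (st : α × β), (l.foldl step st).1 = l.foldl g st.1 := by
  intro l
  induction l with
  | nil => intro st; rfl
  | cons x xs ih => intro st; simp [List.foldl_cons, ih, h]

theorem filter_range_interval (n lo hi : Nat) (h2 : hi ≤ n) :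
    (List.range n).filter (fun j => decide (lo ≤ j ∧ j < hi)) = List.range' lo (hi - lo) := by
  rcases Nat.le_total lo hi with h1 | h1
  · have hsplit : List.range n
        = (List.range' 0 lo ++ List.range' lo (hi - lo)) ++ List.range' hi (n - hi) := by
      rw [List.range_eq_range']
      have e1 : List.range' 0 lo ++ List.range' lo (hi - lo) = List.range' 0 (lo + (hi - lo)) := by
        simpa using (List.range'_append_1 (s := 0) (m := lo) (n := hi - lo))
      have e2 : List.range' 0 hi ++ List.range' hi (n - hi) = List.range' 0 (hi + (n - hi)) := by
        simpa using (List.range'_append_1 (s := 0) (m := hi) (n := n - hi))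
      rw [e1, show lo + (hi - lo) = hi by omega, e2, show hi + (n - hi) = n by omega]
    rw [hsplit, List.filter_append, List.filter_append]
    rw [List.filter_eq_nil_iff.mpr, List.filter_eq_self.mpr, List.filter_eq_nil_iff.mpr]
    · simp
    · intro a ha
      have := List.mem_range'_1.mp ha
      simp; omega
    · intro a ha
      have := List.mem_range'_1.mp ha
      simp; omega
    · intro a ha
      have := List.mem_range'_1.mp ha
      simp; omega
  · rw [Nat.sub_eq_zero_of_le h1]
    apply List.filter_eq_nil_iff.mpr
    intro a _
    simp; omega

-- B's owner as interval membership, for i < uN and j < n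
theorem owNat_eq_iff (n uN i j : Nat) (hi : i < uN) :
    owNat n uN j = i
      ↔ (i * (n / uN) ≤ j ∧ (if i + 1 < uN then j < (i + 1) * (n / uN) else True)) := by
  unfold owNat
  obtain ⟨M, hM⟩ : ∃ M, n / uN = M := ⟨_, rfl⟩
  rw [hM]
  by_cases hmpos : 0 < M
  · obtain ⟨q, hq⟩ : ∃ q, j / M = q := ⟨_, rfl⟩
    have hdiv1 : ∀ k, k ≤ q ↔ k * M ≤ j := fun k => hq ▸ Nat.le_div_iff_mul_le hmpos
    have hdiv2 : ∀ k, q < k ↔ j < k * M := fun k => hq ▸ Nat.div_lt_iff_lt_mul hmpos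
    rw [hq]
    simp only [if_pos hmpos, Nat.min_def]
    by_cases hlast : i + 1 < uN
    · simp only [if_pos hlast]
      constructor
      · intro h
        split_ifs at h with hc
        · exact ⟨(hdiv1 i).mp (by omega), (hdiv2 (i + 1)).mp (by omega)⟩
        · omega
      · rintro ⟨h4, h6⟩
        have h3 : i ≤ q := (hdiv1 i).mpr h4
        have h5 : q < i + 1 := (hdiv2 (i + 1)).mpr h6
        split_ifs with hc
        · omega
        · omega
    · simp only [if_neg hlast]
      constructor
      · intro h
        split_ifs at h with hc
        · exact ⟨(hdiv1 i).mp (by omega), trivial⟩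
        · exact ⟨(hdiv1 i).mp (by omega), trivial⟩
      · rintro ⟨h4, -⟩
        have h3 : i ≤ q := (hdiv1 i).mpr h4
        split_ifs with hc
        · omega
        · omega
  · simp only [if_neg hmpos]
    have hM0 : M = 0 := by omega
    subst hM0
    by_cases hlast : i + 1 < uN
    · simp only [if_pos hlast]
      constructor
      · intro h; omega
      · rintro ⟨-, h⟩; omega
    · simp only [if_neg hlast]
      constructor
      · intro _; exact ⟨by omega, trivial⟩
      · intro _; omega

theorem blkA_eq_filter (n uN i : Nat) (hi : i < uN) :
    (List.range n).filter (fun j => decide (owNat n uN j = i)) = blkA n uN i := by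
  have hend : (if i + 1 < uN then (i + 1) * (n / uN) else n) ≤ n := by
    split
    · calc (i + 1) * (n / uN) ≤ uN * (n / uN) := Nat.mul_le_mul_right _ (by omega)
        _ = (n / uN) * uN := Nat.mul_comm _ _
        _ ≤ n := Nat.div_mul_le_self n uN
    · exact le_refl n
  have hcongr : (List.range n).filter (fun j => decide (owNat n uN j = i))
      = (List.range n).filter
          (fun j => decide (i * (n / uN) ≤ j ∧ j < (if i + 1 < uN then (i + 1) * (n / uN) else n))) := by
    apply List.filter_congr
    intro j hj
    have hjn : j < n := List.mem_range.mp hj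
    have hiff := owNat_eq_iff n uN i j hi
    by_cases hlast : i + 1 < uN
    · simp only [if_pos hlast] at hiff ⊢
      simp [hiff]
    · simp only [if_neg hlast] at hiff ⊢
      simp [hiff, hjn]
  rw [hcongr, filter_range_interval n (i * (n / uN)) _ hend]
  unfold blkA
  by_cases hlast : i + 1 < uN
  · rw [if_pos hlast, if_pos hlast,
      show (i + 1) * (n / uN) - i * (n / uN) = n / uN by rw [Nat.succ_mul]; exact Nat.add_sub_cancel_left _ _]
  · rw [if_neg hlast, if_neg hlast]

-- first match in a Nat-keyed assoc list built by map
theorem find?_map_natkeys (G : Nat → List Int) (k : Nat) :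
    ∀ (ns : List Nat), k ∈ ns →
      ((ns.map (fun i : Nat => ((i : Int), G i))).find? (fun p => p.1 == (k : Int)))
        = some ((k : Int), G k) := by
  intro ns
  induction ns with
  | nil => intro h; cases h
  | cons a tl ih =>
    intro hmem
    by_cases hak : a = k
    · subst hak; simp
    · have hne : ((a : Int) == (k : Int)) = false := by
        simp; exact_mod_cast hak
      have hk : k ∈ tl := by
        rcases List.mem_cons.mp hmem with h | h
        · exact absurd h.symm hak
        · exact h
      simp only [List.map_cons, List.find?_cons, hne]
      exact ih hk

-- modifying a present key in a map-formed dict rewrites exactly that entry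
theorem modify_mapform (uN k : Nat) (hk : k < uN) (G : Nat → List Int)
    (v : List Int → List Int) :
    (PySem.Dict.mk ((List.range uN).map (fun i : Nat => ((i : Int), G i)))).modify
        (k : Int) PySem.Set.empty v
      = ⟨(List.range uN).map (fun i : Nat => ((i : Int), if i = k then v (G k) else G i))⟩ := by
  have hkmem : k ∈ List.range uN := List.mem_range.mpr hk
  have hget : (PySem.Dict.mk ((List.range uN).map (fun i : Nat => ((i : Int), G i)))).getD
      (k : Int) PySem.Set.empty = G k := by
    simp [PySem.Dict.getD, PySem.Dict.get?, find?_map_natkeys G k _ hkmem]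
  have hcont : (PySem.Dict.mk ((List.range uN).map (fun i : Nat => ((i : Int), G i)))).contains
      (k : Int) = true := by
    simp only [PySem.Dict.contains, List.any_map, List.any_eq_true]
    exact ⟨k, hkmem, by simp⟩
  rw [PySem.Dict.modify, hget, PySem.Dict.insert, if_pos hcont]
  congr 1
  simp only [List.map_map]
  apply List.map_congr_left
  intro i _
  by_cases hik : i = k
  · subst hik; simp
  · have hne : ((i : Int) == (k : Int)) = false := by simp; exact_mod_cast hik
    simp [Function.comp, hne, hik]

-- the scatter loop keeps the dict in map form, each user holding its indices so far
theorem scatter_inv (uN : Nat) (ow : Nat → Nat) (how : ∀ j, ow j < uN)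
    (owI : Int → Int) (hcomm : ∀ j : Nat, owI (j : Int) = ((ow j : Nat) : Int)) :
    ∀ t : Nat,
      (((List.range t).map (Nat.cast : Nat → Int)).foldl
          (fun (d : PySem.Dict Int (List Int)) j => d.modify (owI j) PySem.Set.empty (fun s => PySem.Set.add s j))
          ⟨(List.range uN).map (fun i : Nat => ((i : Int), ([] : List Int)))⟩)
        = ⟨(List.range uN).map (fun i : Nat =>
            ((i : Int),
             ((List.range t).filter (fun j => decide (ow j = i))).map (Nat.cast : Nat → Int)))⟩ := by
  intro t
  induction t with
  | zero => simp
  | succ t ih =>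
    rw [List.range_succ, List.map_append, List.foldl_append, ih]
    simp only [List.map_cons, List.map_nil, List.foldl_cons, List.foldl_nil, hcomm t]
    rw [modify_mapform uN (ow t) (how t)
        (fun i => ((List.range t).filter (fun j => decide (ow j = i))).map (Nat.cast : Nat → Int))
        (fun s => PySem.Set.add s (t : Int))]
    congr 1
    apply List.map_congr_left
    intro i hi
    by_cases hit : i = ow t
    · subst hit
      simp [PySem.Set.add, List.filter_append]
    · have hit' : ¬ (ow t = i) := fun h => hit h.symm
      simp [hit, hit', List.filter_append]

-- A's result in canonical form
theorem A_canon (dataset : List Int) (uN : Nat) :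
    stock_iid dataset (uN : Int)
      = (List.range uN).map (fun i : Nat => ((i : Int), (blkA dataset.length uN i).map (Nat.cast))) := by
  unfold stock_iid
  dsimp only
  have htd : PySem.Int.truncdiv (dataset.length : Int) (uN : Int)
      = ((dataset.length / uN : Nat) : Int) := rfl
  rw [htd]
  rw [foldl_fst _ (fun (d : PySem.Dict Int (List Int)) (i : Int) =>
        d.insert i (PySem.Set.ofList (PySem.List.pyRange (i * ((dataset.length / uN : Nat) : Int))
          (if i < (uN : Int) - 1 then (i + 1) * ((dataset.length / uN : Nat) : Int)
           else (dataset.length : Int)))))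
      (fun st i => rfl)]
  dsimp only
  rw [PySem.List.pyRange_zero_nat]
  rw [foldl_insert_fresh _ (List.range uN) ⟨[]⟩ (fun i _ => rfl) List.nodup_range]
  simp only [List.nil_append]
  apply List.map_congr_left
  intro i hi
  have hiu : i < uN := List.mem_range.mp hi
  congr 1
  by_cases hlast : i + 1 < uN
  · have hc : ((i : Int) < (uN : Int) - 1) := by
      have : ((i : Int)) + 1 < (uN : Int) := by exact_mod_cast hlast
      omega
    rw [if_pos hc]
    have e1 : ((i : Int)) * ((dataset.length / uN : Nat) : Int)
        = ((i * (dataset.length / uN) : Nat) : Int) := by push_cast; ring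
    have e2 : ((i : Int) + 1) * ((dataset.length / uN : Nat) : Int)
        = (((i + 1) * (dataset.length / uN) : Nat) : Int) := by push_cast; ring
    rw [e1, e2, pyRange_natCast_natCast,
      show (i + 1) * (dataset.length / uN) - i * (dataset.length / uN) = dataset.length / uN by
        rw [Nat.succ_mul]; exact Nat.add_sub_cancel_left _ _]
    rw [PySem.Set.ofList_eq_self_of_nodup _
      (List.Nodup.map (fun a b h => by exact_mod_cast h) List.nodup_range')]
    unfold blkA
    rw [if_pos hlast]
  · have hc : ¬ ((i : Int) < (uN : Int) - 1) := by
      intro h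
      have : ((i : Int)) + 1 < (uN : Int) := by omega
      exact hlast (by exact_mod_cast this)
    rw [if_neg hc]
    have e1 : ((i : Int)) * ((dataset.length / uN : Nat) : Int)
        = ((i * (dataset.length / uN) : Nat) : Int) := by push_cast; ring
    rw [e1, pyRange_natCast_natCast]
    rw [PySem.Set.ofList_eq_self_of_nodup _
      (List.Nodup.map (fun a b h => by exact_mod_cast h) List.nodup_range')]
    unfold blkA
    rw [if_neg hlast]

-- B's result in canonical form
theorem B_canon (dataset : List Int) (uN : Nat) (hu : 1 ≤ uN) :
    stock_iid_alt dataset (uN : Int)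
      = (List.range uN).map (fun i : Nat => ((i : Int), (blkA dataset.length uN i).map (Nat.cast))) := by
  unfold stock_iid_alt
  dsimp only
  rw [PySem.Int.floordiv_natCast]
  have hd0 : ((PySem.List.pyRange 0 (uN : Int)).foldl
      (fun (d : PySem.Dict Int (List Int)) i => d.insert i (PySem.Set.empty : PySem.Set Int)) ⟨[]⟩)
      = ⟨(List.range uN).map (fun i : Nat => ((i : Int), ([] : List Int)))⟩ := by
    apply dict_eq_of_items
    rw [PySem.List.pyRange_zero_nat]
    rw [foldl_insert_fresh (fun _ => (PySem.Set.empty : PySem.Set Int)) (List.range uN) ⟨[]⟩ (fun i _ => rfl) List.nodup_range]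
    simp [PySem.Set.empty]
  rw [hd0, PySem.List.pyRange_zero_nat]
  have how : ∀ j, owNat dataset.length uN j < uN := by
    intro j
    unfold owNat
    split
    · exact lt_of_le_of_lt (min_le_right _ _) (by omega)
    · omega
  have hcomm : ∀ j : Nat,
      (if 0 < ((dataset.length / uN : Nat) : Int)
       then min (PySem.Int.floordiv (j : Int) ((dataset.length / uN : Nat) : Int)) ((uN : Int) - 1)
       else (uN : Int) - 1)
      = ((owNat dataset.length uN j : Nat) : Int) := by
    intro j
    unfold owNat
    by_cases h0 : 0 < dataset.length / uN
    · rw [if_pos (by exact_mod_cast h0), if_pos h0, PySem.Int.floordiv_natCast,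
        show ((uN : Int) - 1) = ((uN - 1 : Nat) : Int) by omega]
      exact (Nat.cast_min _ _).symm
    · rw [if_neg (by exact_mod_cast h0), if_neg h0]
      omega
  rw [scatter_inv uN (owNat dataset.length uN) how
      (fun j => if 0 < ((dataset.length / uN : Nat) : Int)
        then min (PySem.Int.floordiv j ((dataset.length / uN : Nat) : Int)) ((uN : Int) - 1)
        else (uN : Int) - 1)
      hcomm dataset.length]
  apply List.map_congr_left
  intro i hi
  congr 1
  rw [blkA_eq_filter dataset.length uN i (List.mem_range.mp hi)]

-- ===== VERDICT (by name: the statement is the Claim_ definition above) =====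
theorem stock_iid_spec : Claim_equal_stock_iid := by
  intro dataset num_users _hDom hPre
  unfold Spec_stock_iid
  obtain ⟨uN, rfl⟩ : ∃ uN : Nat, num_users = (uN : Int) :=
    ⟨num_users.toNat, (Int.toNat_of_nonneg (by exact le_trans (by norm_num) hPre)).symm⟩
  have hu : 1 ≤ uN := by unfold Pre_stock_iid at hPre; exact_mod_cast hPre
  rw [A_canon dataset uN, B_canon dataset uN hu]
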